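-- pv_equiv track=rewrite | github.com/alanh90/BicameralAGI | source/bica/bica_reasoning.py | _structure_analysis
-- ===== SOURCE A (Python) =====
-- from typing import List, Dict, Any
--
-- def _structure_analysis(analysis: str) -> Dict[str, Any]:
--     """
--     Convert the GPT-generated analysis into a structured dictionary.
--     """
--     lines = analysis.split('\n')
--     structured = {}
--     current_key = ''
--     for line in lines:
--         if line.startswith(('1.', '2.', '3.', '4.', '5.', '6.')):
--             current_key = line[3:].strip()
--             structured[current_key] = []
--         elif current_key and line.strip():
--             structured[current_key].append(line.strip())
--     return structured
-- ===== SOURCE B (Python) =====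
-- def _is_header(line):
--     return len(line) >= 2 and line[0] in '123456' and line[1] == '.'
--
--
-- def _structure_analysis(analysis: str):
--     """Section-at-a-time parse: find each header, collect its whole body, assign once."""
--     structured = {}
--     rest = analysis.split('\n')
--     while rest:
--         line, rest = rest[0], rest[1:]
--         if _is_header(line):
--             key = line[3:].strip()
--             body = []
--             while rest and not _is_header(rest[0]):
--                 s = rest[0].strip()
--                 if key and s:
--                     body.append(s)
--                 rest = rest[1:]
--             structured[key] = body
--     return structured
-- ===== Notes on version B (the rewrite author's own statement) =====
-- stated objective: alternative
-- what changed: B replaces A's line-by-line state machine (dict plus a current_key register, reset-then-append per line) with a section-at-a-time parse: it finds each header, collects that section's whole body with an inner scan up to the next header, and assigns the finished list into the dict once per section.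
import Mathlib
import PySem

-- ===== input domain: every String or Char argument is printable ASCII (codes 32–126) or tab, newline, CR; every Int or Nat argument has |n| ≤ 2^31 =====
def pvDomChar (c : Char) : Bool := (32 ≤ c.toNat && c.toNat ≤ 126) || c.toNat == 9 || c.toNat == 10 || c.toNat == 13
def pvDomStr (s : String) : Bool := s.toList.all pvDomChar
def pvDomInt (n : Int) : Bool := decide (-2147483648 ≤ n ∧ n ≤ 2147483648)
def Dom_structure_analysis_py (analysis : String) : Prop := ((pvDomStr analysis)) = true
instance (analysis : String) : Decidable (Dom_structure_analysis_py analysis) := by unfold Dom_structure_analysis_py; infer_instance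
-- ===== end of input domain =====

-- B parses section-at-a-time (find a header, collect its whole body, assign once) instead of A's
-- line-by-line state machine with a current-key register; same return value, similar cost.

-- ===== PORT A =====
-- analysis.split('\n'): Chars.splitOn with the non-empty separator '\n' is exact
def pyLines (s : String) : List String := (PySem.Chars.splitOn s.toList ['\n']).map String.ofList

-- line.startswith(('1.', '2.', '3.', '4.', '5.', '6.'))
def aIsHeader (line : String) : Bool :=
  PySem.Str.startswith line "1." || PySem.Str.startswith line "2." || PySem.Str.startswith line "3." ||
  PySem.Str.startswith line "4." || PySem.Str.startswith line "5." || PySem.Str.startswith line "6."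

-- one iteration of A's for-loop; state = (structured, current_key)
def aStep (st : PySem.Dict String (List String) × String) (line : String) :
    PySem.Dict String (List String) × String :=
  if aIsHeader line then
    let k := PySem.Str.strip (PySem.Str.slice line (some 3) none)
    (st.1.insert k [], k)
  else if st.2 ≠ "" ∧ PySem.Str.strip line ≠ "" then
    -- structured[current_key].append(line.strip()): a non-empty current_key was set at its own
    -- header, so the key is always present and Dict.modify (differs only on a missing key) is exact
    (st.1.modify st.2 [] (fun v => v ++ [PySem.Str.strip line]), st.2)
  else st

def structure_analysis_py (analysis : String) : List (String × List String) :=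
  ((pyLines analysis).foldl aStep (PySem.Dict.empty, "")).1.items

-- ===== PORT B =====
-- len(line) >= 2 and line[0] in '123456' and line[1] == '.'
-- (hand port, exact: the length-2 pattern match on the characters = the len test plus the two indexings)
def bIsHeader (line : String) : Bool :=
  match line.toList with
  | c0 :: c1 :: _ => (['1', '2', '3', '4', '5', '6'] : List Char).contains c0 && c1 == '.'
  | _ => false

-- B's inner while loop: consume body lines up to the next header; returns (body, rest)
def bCollect (key : String) (body : List String) (rest : List String) :
    List String × List String :=
  match rest with
  | [] => (body, [])
  | l :: tl =>
    if bIsHeader l then (body, l :: tl)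
    else
      let s := PySem.Str.strip l
      bCollect key (if key ≠ "" ∧ s ≠ "" then body ++ [s] else body) tl

-- needed by bLoop's termination: bCollect returns a suffix of its input
theorem bCollect_length (key : String) (body rest : List String) :
    (bCollect key body rest).2.length ≤ rest.length := by
  induction rest generalizing body with
  | nil => simp [bCollect]
  | cons l tl ih =>
    by_cases hb : bIsHeader l
    · simp [bCollect, hb]
    · simp only [bCollect, hb, Bool.false_eq_true, if_false]
      exact Nat.le_succ_of_le (ih _)

-- B's outer while loop
def bLoop (structured : PySem.Dict String (List String)) (rest : List String) :
    PySem.Dict String (List String) :=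
  match rest with
  | [] => structured
  | line :: tl =>
    if bIsHeader line then
      let key := PySem.Str.strip (PySem.Str.slice line (some 3) none)
      let r := bCollect key [] tl
      bLoop (structured.insert key r.1) r.2
    else bLoop structured tl
termination_by rest.length
decreasing_by
  · exact Nat.lt_succ_of_le (bCollect_length _ _ _)
  · simp

def structure_analysis_py_alt (analysis : String) : List (String × List String) :=
  (bLoop PySem.Dict.empty (pyLines analysis)).items

-- ===== PRECONDITION & SPEC =====
def Spec_structure_analysis_py (analysis : String) (out : List (String × List String)) : Prop := out = structure_analysis_py_alt analysis
instance (analysis : String) (out : List (String × List String)) : Decidable (Spec_structure_analysis_py analysis out) := by unfold Spec_structure_analysis_py; infer_instance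

-- ===== CLAIM (what is proved, stated in full; the proofs are below) =====
def Claim_equal_structure_analysis_py : Prop := ∀ (analysis : String), Dom_structure_analysis_py analysis → Spec_structure_analysis_py analysis (structure_analysis_py analysis)

-- ===== LEMMAS AND PROOFS =====

-- startswith by a two-character pattern, in closed form
theorem sw_pair (a b : Char) (cs : List Char) :
    PySem.Chars.startswith cs [a, b] =
      (match cs with | c0 :: c1 :: _ => c0 == a && c1 == b | _ => false) := by
  match cs with
  | [] => simp [PySem.Chars.startswith, List.isPrefixOf]
  | [c] => simp [PySem.Chars.startswith, List.isPrefixOf]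
  | c0 :: c1 :: r => simp [PySem.Chars.startswith, List.isPrefixOf, Bool.beq_comm]

-- the two header tests agree
theorem hdr_eq (l : String) : aIsHeader l = bIsHeader l := by
  unfold aIsHeader bIsHeader
  simp only [PySem.Str.startswith_eq]
  have h1 : ("1." : String).toList = ['1', '.'] := rfl
  have h2 : ("2." : String).toList = ['2', '.'] := rfl
  have h3 : ("3." : String).toList = ['3', '.'] := rfl
  have h4 : ("4." : String).toList = ['4', '.'] := rfl
  have h5 : ("5." : String).toList = ['5', '.'] := rfl
  have h6 : ("6." : String).toList = ['6', '.'] := rfl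
  rw [h1, h2, h3, h4, h5, h6, sw_pair, sw_pair, sw_pair, sw_pair, sw_pair, sw_pair]
  match l.toList with
  | [] => rfl
  | [c] => rfl
  | c0 :: c1 :: r =>
    simp only [List.contains_cons, List.elem_nil, Bool.or_false]
    cases hb : c1 == '.' <;> simp [Bool.or_assoc]

-- A's body branch, as a function of the dict alone
def appOne (d : PySem.Dict String (List String)) (k l : String) : PySem.Dict String (List String) :=
  if k ≠ "" ∧ PySem.Str.strip l ≠ "" then d.modify k [] (fun v => v ++ [PySem.Str.strip l]) else d

theorem aStep_hdr {line : String} (h : bIsHeader line = true) (d : PySem.Dict String (List String)) (k : String) :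
    aStep (d, k) line = (d.insert (PySem.Str.strip (PySem.Str.slice line (some 3) none)) [],
                         PySem.Str.strip (PySem.Str.slice line (some 3) none)) := by
  simp [aStep, hdr_eq, h]

theorem aStep_nohdr {line : String} (h : bIsHeader line = false) (d : PySem.Dict String (List String)) (k : String) :
    aStep (d, k) line = (appOne d k line, k) := by
  simp only [aStep, hdr_eq, h, Bool.false_eq_true, if_false, appOne]
  split <;> rfl

theorem appOne_empty (d : PySem.Dict String (List String)) (l : String) : appOne d "" l = d := by
  simp [appOne]

-- modifying a just-inserted key rewrites its value in place
theorem modify_insert (d : PySem.Dict String (List String)) (k : String) (v : List String)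
    (f : List String → List String) :
    (d.insert k v).modify k [] f = d.insert k (f v) := by
  simp [PySem.Dict.modify, PySem.Dict.insert_insert_self]

-- running A over the body lines of a section = inserting B's collected body
theorem foldA_body (rest : List String) (d : PySem.Dict String (List String)) (k : String)
    (body : List String) :
    (rest.foldl aStep (d.insert k body, k)).1 =
      ((bCollect k body rest).2.foldl aStep (d.insert k (bCollect k body rest).1, k)).1 := by
  induction rest generalizing body with
  | nil => simp [bCollect]
  | cons l tl ih =>
    by_cases hb : bIsHeader l
    · simp [bCollect, hb]
    · simp only [List.foldl_cons, aStep_nohdr (by simpa using hb), bCollect, hb,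
        Bool.false_eq_true, if_false]
      by_cases hc : k ≠ "" ∧ PySem.Str.strip l ≠ ""
      · simp only [appOne, modify_insert, if_pos hc]
        exact ih (body ++ [PySem.Str.strip l])
      · simp only [appOne, if_neg hc]
        exact ih body
-- bCollect stops at a header (or at the end of the input)
theorem bCollect_stop (key : String) (body rest : List String) (l' : String)
    (h : (bCollect key body rest).2.head? = some l') : bIsHeader l' = true := by
  induction rest generalizing body with
  | nil => simp [bCollect] at h
  | cons l tl ih =>
    by_cases hb : bIsHeader l
    · simp only [bCollect, hb, if_pos, List.head?_cons, Option.some.injEq] at h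
      exact h ▸ hb
    · simp only [bCollect, hb, Bool.false_eq_true, if_false] at h
      exact ih _ h

-- main invariant: from a fresh state ("" key, or positioned at a header) A's fold is B's loop
theorem foldA_main (rest : List String) (d : PySem.Dict String (List String)) (k : String)
    (h : k = "" ∨ ∀ l', rest.head? = some l' → bIsHeader l' = true) :
    (rest.foldl aStep (d, k)).1 = bLoop d rest := by
  match rest with
  | [] => simp [bLoop]
  | l :: tl =>
    by_cases hb : bIsHeader l
    · rw [List.foldl_cons, aStep_hdr hb, foldA_body,
        foldA_main (bCollect (PySem.Str.strip (PySem.Str.slice l (some 3) none)) [] tl).2 _ _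
          (Or.inr (bCollect_stop _ _ _)), bLoop]
      simp [hb]
    · have hk : k = "" := by
        rcases h with hk | hh
        · exact hk
        · exact absurd (hh l rfl) (by simpa using hb)
      subst hk
      rw [List.foldl_cons, aStep_nohdr (by simpa using hb), appOne_empty,
        foldA_main tl d "" (Or.inl rfl), bLoop]
      simp [hb]
termination_by rest.length
decreasing_by
  · exact Nat.lt_succ_of_le (bCollect_length _ _ _)
  · simp

-- ===== VERDICT (by name: the statement is the Claim_ definition above) =====
theorem structure_analysis_py_spec : Claim_equal_structure_analysis_py := by
  intro analysis _
  show structure_analysis_py analysis = structure_analysis_py_alt analysis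
  unfold structure_analysis_py structure_analysis_py_alt
  exact congrArg PySem.Dict.items
    (foldA_main (pyLines analysis) PySem.Dict.empty "" (Or.inl rfl))
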